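-- pv_equiv track=rewrite | github.com/scikit-hep/scikit-hep | skhep/dataset/numpydataset.py | __format_operand
-- ===== SOURCE A (Python) =====
-- def __format_operand( operand, operator):
--     if operator == "*"   and any( _op in operand for _op in ["+","-","/"]):
--         operand = "({0})".format( operand )
--     elif operator == "/" and any( _op in operand for _op in ["+","-","*"]):
--         operand = "({0})".format( operand )
--     elif operator == "^" and any( _op in operand for _op in ["+","-","*","/"]):
--         operand = "({0})".format( operand )
--
--     return operand
-- ===== SOURCE B (Python) =====
-- def _prec(tok):
--     # numeric precedence level of a single operator token; 0 = not an operator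
--     if tok == "+" or tok == "-":
--         return 1
--     if tok == "*" or tok == "/":
--         return 2
--     if tok == "^":
--         return 3
--     return 0
--
-- def __format_operand(operand, operator):
--     p = _prec(operator)
--     if p >= 2:
--         for ch in operand:
--             q = _prec(ch)
--             if 1 <= q <= p and ch != operator:
--                 return "({0})".format(operand)
--     return operand
-- ===== Notes on version B (the rewrite author's own statement) =====
-- stated objective: alternative
-- what changed: Replaced the three per-operator trigger-set membership tests (elif chain with hard-coded lists) by a single scan over the operand's characters using numeric precedence levels: wrap iff the operator's precedence is at least 2 and some character is an operator with precedence between 1 and the operator's that is not the operator itself.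
import Mathlib
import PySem

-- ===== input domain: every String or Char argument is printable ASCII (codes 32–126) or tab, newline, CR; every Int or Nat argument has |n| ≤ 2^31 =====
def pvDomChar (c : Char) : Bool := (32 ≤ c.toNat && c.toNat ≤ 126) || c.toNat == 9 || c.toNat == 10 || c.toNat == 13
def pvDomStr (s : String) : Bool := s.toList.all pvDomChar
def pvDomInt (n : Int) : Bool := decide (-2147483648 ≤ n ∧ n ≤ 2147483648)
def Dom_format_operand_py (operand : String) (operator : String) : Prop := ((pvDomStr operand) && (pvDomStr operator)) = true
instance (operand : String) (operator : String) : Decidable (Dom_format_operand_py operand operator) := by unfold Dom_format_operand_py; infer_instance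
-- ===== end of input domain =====

-- B: single scan over the operand's characters comparing numeric precedence levels (wrap iff some char is a
-- lower-or-equal-precedence operator other than the operator itself), replacing A's per-operator trigger-set
-- membership chain; alternative decomposition, same cost.


-- ===== PORT A =====
def format_operand_py (operand : String) (operator : String) : String :=
  if operator == "*" && (["+", "-", "/"].any (fun op => PySem.Str.isIn op operand)) then
    "(" ++ operand ++ ")"
  else if operator == "/" && (["+", "-", "*"].any (fun op => PySem.Str.isIn op operand)) then
    "(" ++ operand ++ ")"
  else if operator == "^" && (["+", "-", "*", "/"].any (fun op => PySem.Str.isIn op operand)) then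
    "(" ++ operand ++ ")"
  else operand

-- ===== PORT B =====
-- numeric precedence level of a single operator token; 0 = not an operator
def pvPrec (tok : String) : Int :=
  if tok == "+" || tok == "-" then 1
  else if tok == "*" || tok == "/" then 2
  else if tok == "^" then 3
  else 0

-- Python's early-returning for-loop over the operand's characters is ported as List.any
def format_operand_py_alt (operand : String) (operator : String) : String :=
  let p := pvPrec operator
  if p ≥ 2 &&
      operand.toList.any (fun ch =>
        let q := pvPrec (String.ofList [ch])
        (1 ≤ q && q ≤ p) && (String.ofList [ch] != operator)) then
    "(" ++ operand ++ ")"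
  else operand

-- ===== PRECONDITION & SPEC =====
def Spec_format_operand_py (operand : String) (operator : String) (out : String) : Prop := out = format_operand_py_alt operand operator
instance (operand : String) (operator : String) (out : String) : Decidable (Spec_format_operand_py operand operator out) := by unfold Spec_format_operand_py; infer_instance

-- ===== CLAIM =====
def Claim_equal_format_operand_py : Prop := ∀ (operand : String) (operator : String), Dom_format_operand_py operand operator → Spec_format_operand_py operand operator (format_operand_py operand operator)

-- ===== LEMMAS AND PROOFS =====
theorem pv_infix_single (c : Char) (l : List Char) : [c] <:+: l ↔ c ∈ l := by
  constructor
  · intro h; exact h.mem (List.mem_singleton_self c)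
  · intro h
    obtain ⟨s, t, rfl⟩ := List.append_of_mem h
    exact ⟨s, t, by simp⟩

theorem pv_chars_isIn_single (c : Char) (l : List Char) :
    PySem.Chars.isIn [c] l = l.any (fun x => x == c) := by
  by_cases hm : c ∈ l
  · rw [(PySem.Chars.isIn_iff_infix _ _).mpr ((pv_infix_single c l).mpr hm)]
    symm; rw [List.any_eq_true]; exact ⟨c, hm, by simp⟩
  · rw [(PySem.Chars.isIn_eq_false_iff _ _).mpr (fun h => hm ((pv_infix_single c l).mp h))]
    symm; rw [List.any_eq_false]
    intro x hx hxc
    exact hm (by rwa [eq_of_beq hxc] at hx)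

theorem pv_ofList_single_eq (c d : Char) : (String.ofList [c] = String.ofList [d]) ↔ c = d := by
  constructor
  · intro h; have := congrArg String.toList h; simpa using this
  · intro h; rw [h]

theorem pv_any_or (l : List Char) (p q : Char → Bool) :
    l.any (fun x => p x || q x) = (l.any p || l.any q) := by
  induction l with
  | nil => rfl
  | cons a l ih => simp [List.any_cons, ih, Bool.or_assoc, Bool.or_left_comm]

theorem pv_pred_star (c : Char) :
    ((1 ≤ pvPrec (String.ofList [c]) && pvPrec (String.ofList [c]) ≤ 2) && (String.ofList [c] != "*"))
      = ((c == '+') || (c == '-') || (c == '/')) := by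
  by_cases h1 : c = '+'; · subst h1; decide
  by_cases h2 : c = '-'; · subst h2; decide
  by_cases h3 : c = '/'; · subst h3; decide
  by_cases h4 : c = '*'; · subst h4; decide
  by_cases h5 : c = '^'; · subst h5; decide
  have e : ∀ d : Char, c ≠ d → (String.ofList [c] == String.ofList [d]) = false := by
    intro d hd; simp [pv_ofList_single_eq, hd]
  simp only [pvPrec, show ("+" : String) = String.ofList ['+'] from by decide,
    show ("-" : String) = String.ofList ['-'] from by decide,
    show ("*" : String) = String.ofList ['*'] from by decide,
    show ("/" : String) = String.ofList ['/'] from by decide,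
    show ("^" : String) = String.ofList ['^'] from by decide,
    e _ h1, e _ h2, e _ h3, e _ h4, e _ h5]
  simp [h1, h2, h3]

theorem pv_pred_div (c : Char) :
    ((1 ≤ pvPrec (String.ofList [c]) && pvPrec (String.ofList [c]) ≤ 2) && (String.ofList [c] != "/"))
      = ((c == '+') || (c == '-') || (c == '*')) := by
  by_cases h1 : c = '+'; · subst h1; decide
  by_cases h2 : c = '-'; · subst h2; decide
  by_cases h3 : c = '/'; · subst h3; decide
  by_cases h4 : c = '*'; · subst h4; decide
  by_cases h5 : c = '^'; · subst h5; decide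
  have e : ∀ d : Char, c ≠ d → (String.ofList [c] == String.ofList [d]) = false := by
    intro d hd; simp [pv_ofList_single_eq, hd]
  simp only [pvPrec, show ("+" : String) = String.ofList ['+'] from by decide,
    show ("-" : String) = String.ofList ['-'] from by decide,
    show ("*" : String) = String.ofList ['*'] from by decide,
    show ("/" : String) = String.ofList ['/'] from by decide,
    show ("^" : String) = String.ofList ['^'] from by decide,
    e _ h1, e _ h2, e _ h3, e _ h4, e _ h5]
  simp [h1, h2, h4]

theorem pv_pred_pow (c : Char) :
    ((1 ≤ pvPrec (String.ofList [c]) && pvPrec (String.ofList [c]) ≤ 3) && (String.ofList [c] != "^"))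
      = ((c == '+') || ((c == '-') || ((c == '*') || (c == '/')))) := by
  by_cases h1 : c = '+'; · subst h1; decide
  by_cases h2 : c = '-'; · subst h2; decide
  by_cases h3 : c = '/'; · subst h3; decide
  by_cases h4 : c = '*'; · subst h4; decide
  by_cases h5 : c = '^'; · subst h5; decide
  have e : ∀ d : Char, c ≠ d → (String.ofList [c] == String.ofList [d]) = false := by
    intro d hd; simp [pv_ofList_single_eq, hd]
  simp only [pvPrec, show ("+" : String) = String.ofList ['+'] from by decide,
    show ("-" : String) = String.ofList ['-'] from by decide,
    show ("*" : String) = String.ofList ['*'] from by decide,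
    show ("/" : String) = String.ofList ['/'] from by decide,
    show ("^" : String) = String.ofList ['^'] from by decide,
    e _ h1, e _ h2, e _ h3, e _ h4, e _ h5]
  simp [h1, h2, h3, h4]

theorem pv_cond_star (operand : String) :
    (["+","-","/"].any fun op => PySem.Str.isIn op operand)
      = operand.toList.any (fun ch =>
          (1 ≤ pvPrec (String.ofList [ch]) && pvPrec (String.ofList [ch]) ≤ 2) && (String.ofList [ch] != "*")) := by
  simp only [List.any_cons, List.any_nil, Bool.or_false, PySem.Str.isIn_eq, pv_pred_star]
  rw [show (("+":String).toList) = ['+'] from by decide, show (("-":String).toList) = ['-'] from by decide,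
     show (("/":String).toList) = ['/'] from by decide]
  simp only [pv_chars_isIn_single, pv_any_or, Bool.or_assoc]

theorem pv_cond_div (operand : String) :
    (["+","-","*"].any fun op => PySem.Str.isIn op operand)
      = operand.toList.any (fun ch =>
          (1 ≤ pvPrec (String.ofList [ch]) && pvPrec (String.ofList [ch]) ≤ 2) && (String.ofList [ch] != "/")) := by
  simp only [List.any_cons, List.any_nil, Bool.or_false, PySem.Str.isIn_eq, pv_pred_div]
  rw [show (("+":String).toList) = ['+'] from by decide, show (("-":String).toList) = ['-'] from by decide,
     show (("*":String).toList) = ['*'] from by decide]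
  simp only [pv_chars_isIn_single, pv_any_or, Bool.or_assoc]

theorem pv_cond_pow (operand : String) :
    (["+","-","*","/"].any fun op => PySem.Str.isIn op operand)
      = operand.toList.any (fun ch =>
          (1 ≤ pvPrec (String.ofList [ch]) && pvPrec (String.ofList [ch]) ≤ 3) && (String.ofList [ch] != "^")) := by
  simp only [List.any_cons, List.any_nil, Bool.or_false, PySem.Str.isIn_eq, pv_pred_pow]
  rw [show (("+":String).toList) = ['+'] from by decide, show (("-":String).toList) = ['-'] from by decide,
     show (("*":String).toList) = ['*'] from by decide, show (("/":String).toList) = ['/'] from by decide]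
  simp only [pv_chars_isIn_single, pv_any_or, Bool.or_assoc]

-- ===== VERDICT =====
theorem format_operand_py_spec : Claim_equal_format_operand_py := by
  intro operand operator _
  unfold Spec_format_operand_py
  by_cases h1 : operator = "*"
  · subst h1
    simp only [format_operand_py, format_operand_py_alt, show pvPrec "*" = 2 from by decide,
      pv_cond_star operand]
    simp
  · by_cases h2 : operator = "/"
    · subst h2
      simp only [format_operand_py, format_operand_py_alt, show pvPrec "/" = 2 from by decide,
        pv_cond_div operand]
      simp
    · by_cases h3 : operator = "^"
      · subst h3
        simp only [format_operand_py, format_operand_py_alt, show pvPrec "^" = 3 from by decide,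
          pv_cond_pow operand]
        simp
      · have hp : ¬ (pvPrec operator ≥ 2) := by
          unfold pvPrec
          by_cases h4 : operator = "+"; · subst h4; decide
          by_cases h5 : operator = "-"; · subst h5; decide
          simp [h1, h2, h3, h4, h5]
        simp [format_operand_py, format_operand_py_alt, h1, h2, h3, hp]
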